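-- pv_equiv track=rewrite | github.com/Jobin-Nelson/learn | interview/convert_a_to_b.py | convert_a_to_b
-- ===== SOURCE A (Python) =====
-- def convert_a_to_b(a, b, c):
--     a = list(a)
--     b = list(b)
--     c = list(c)
--     for idx, chr in enumerate(zip(a, b)):
--         ch_a, ch_b = chr
--         if ch_a != ch_b:
--             if ch_b in c:
--                 a.insert(idx, ch_b)
--                 c.remove(ch_b)
--             else:
--                 return False
--     return a == b
-- ===== SOURCE B (Python) =====
-- def convert_a_to_b(a, b, c):
--     # count the available chars of c once, then do a two-pointer scan of a and b
--     avail = {}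
--     for ch in c:
--         avail[ch] = avail.get(ch, 0) + 1
--     i = 0
--     n = 0
--     while i < len(a) and n < len(b):
--         if a[i] == b[n]:
--             i += 1
--             n += 1
--         elif avail.get(b[n], 0) > 0:
--             avail[b[n]] = avail[b[n]] - 1
--             n += 1
--         else:
--             return False
--     return i == len(a) and n == len(b)
-- ===== Notes on version B (the rewrite author's own statement) =====
-- stated objective: faster
-- what changed: B replaces A's insertion into the live list a while iterating over zip(a, b) by a two-pointer scan over the unchanged strings, consuming c through a character-count dictionary built once, so the linear membership scans, removes and insert shifts disappear.
import Mathlib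
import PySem

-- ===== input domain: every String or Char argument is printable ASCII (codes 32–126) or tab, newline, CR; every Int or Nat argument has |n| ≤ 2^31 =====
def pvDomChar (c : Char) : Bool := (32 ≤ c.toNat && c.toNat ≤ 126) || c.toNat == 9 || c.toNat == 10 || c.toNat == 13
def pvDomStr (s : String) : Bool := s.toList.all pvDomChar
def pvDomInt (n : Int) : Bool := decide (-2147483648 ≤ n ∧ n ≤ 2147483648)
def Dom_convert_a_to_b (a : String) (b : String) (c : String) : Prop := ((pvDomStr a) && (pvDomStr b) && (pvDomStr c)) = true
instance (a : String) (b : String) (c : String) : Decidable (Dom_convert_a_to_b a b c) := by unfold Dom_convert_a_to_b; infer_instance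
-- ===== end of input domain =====

-- B replaces A's insert-into-a-live-list-while-zipping loop by a two-pointer scan
-- over the unchanged strings with a character counter for c (objective: faster).


-- ===== PORT A =====
-- the for-loop over enumerate(zip(a, b)): both list iterators advance in step, so the
-- loop runs while idx is in range of BOTH the current (mutated) a and b
def convAux (aCur : List Char) (b : List Char) (c : List Char) (idx : Nat) : Bool :=
  if h : idx < aCur.length ∧ idx < b.length then
    let ch_a := aCur[idx]'h.1
    let ch_b := b[idx]'h.2
    if ch_a ≠ ch_b then
      if ch_b ∈ c then
        -- c.remove(ch_b): guarded by 'ch_b ∈ c', so remove? is always 'some' here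
        convAux (PySem.List.insert aCur (idx : Int) ch_b) b
          ((PySem.List.remove? c ch_b).getD c) (idx + 1)
      else false
    else convAux aCur b c (idx + 1)
  else aCur == b
termination_by b.length - idx
decreasing_by all_goals omega

def convert_a_to_b (a : String) (b : String) (c : String) : Bool :=
  convAux a.toList b.toList c.toList 0

-- ===== PORT B =====
-- the while-loop of Source B, two indices into the unchanged lists
def convAltAux (a : List Char) (b : List Char) (avail : PySem.Dict Char Int)
    (i : Nat) (n : Nat) : Bool :=
  if h : i < a.length ∧ n < b.length then
    if a[i]'h.1 == b[n]'h.2 then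
      convAltAux a b avail (i + 1) (n + 1)
    else if avail.getD (b[n]'h.2) 0 > 0 then
      convAltAux a b (avail.insert (b[n]'h.2) (avail.getD (b[n]'h.2) 0 - 1)) i (n + 1)
    else false
  else decide (i = a.length) && decide (n = b.length)
termination_by (a.length - i) + (b.length - n)
decreasing_by all_goals omega

def convert_a_to_b_alt (a : String) (b : String) (c : String) : Bool :=
  convAltAux a.toList b.toList
    (c.toList.foldl (fun d ch => d.modify ch 0 (· + 1)) PySem.Dict.empty) 0 0

-- ===== PRECONDITION & SPEC =====
def Spec_convert_a_to_b (a : String) (b : String) (c : String) (out : Bool) : Prop := out = convert_a_to_b_alt a b c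
instance (a : String) (b : String) (c : String) (out : Bool) : Decidable (Spec_convert_a_to_b a b c out) := by unfold Spec_convert_a_to_b; infer_instance

-- ===== CLAIM (what is proved, stated in full; the proofs are below) =====
def Claim_equal_convert_a_to_b : Prop := ∀ (a : String) (b : String) (c : String), Dom_convert_a_to_b a b c → Spec_convert_a_to_b a b c (convert_a_to_b a b c)

-- ===== LEMMAS AND PROOFS =====

-- invariant: A's live list is b's consumed prefix followed by the unread tail of the
-- original a, and B's counter agrees with A's remaining c as a multiset
lemma take_succ_getElem (b : List Char) (n : Nat) (h : n < b.length) :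
    b.take (n+1) = b.take n ++ [b[n]] := by
  rw [List.take_add_one]
  simp [List.getElem?_eq_getElem h]

lemma convAux_eq_alt (a0 b : List Char) :
    ∀ (k i n : Nat) (c : List Char) (avail : PySem.Dict Char Int),
      (a0.length - i) + (b.length - n) ≤ k →
      i ≤ a0.length → n ≤ b.length →
      (∀ ch, avail.getD ch 0 = (c.count ch : Int)) →
      convAux (b.take n ++ a0.drop i) b c n = convAltAux a0 b avail i n := by
  intro k
  induction k with
  | zero =>
    intro i n c avail hk hi hn _
    have hi' : i = a0.length := by omega
    have hn' : n = b.length := by omega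
    subst hi'; subst hn'
    rw [convAux, convAltAux]
    simp
  | succ k ih =>
    intro i n c avail hk hi hn hinv
    have hlen : (b.take n ++ a0.drop i).length = n + (a0.length - i) := by
      simp [List.length_take]; omega
    rw [convAux, convAltAux]
    by_cases hcond : i < a0.length ∧ n < b.length
    · have hc1 : n < (b.take n ++ a0.drop i).length ∧ n < b.length := by
        constructor <;> omega
      rw [dif_pos hc1, dif_pos hcond]
      have hget : (b.take n ++ a0.drop i)[n]'hc1.1 = a0[i]'hcond.1 := by
        have htk : (b.take n).length = n := by simp; omega
        rw [List.getElem_append_right (by omega)]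
        simp [htk, List.getElem_drop]
      simp only [hget]
      by_cases heq : a0[i]'hcond.1 = b[n]'hcond.2
      · -- matching characters: both advance
        rw [if_neg (show ¬ (a0[i]'hcond.1 ≠ b[n]'hcond.2) from by simp [heq]),
            if_pos (show (a0[i]'hcond.1 == b[n]'hcond.2) = true from by simp [heq])]
        have hrew : b.take n ++ a0.drop i = b.take (n+1) ++ a0.drop (i+1) := by
          rw [take_succ_getElem b n hcond.2, List.append_assoc, List.singleton_append,
              ← heq, ← List.drop_eq_getElem_cons hcond.1]
        rw [hrew]
        exact ih (i+1) (n+1) c avail (by omega) (by omega) (by omega) hinv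
      · rw [if_pos (show a0[i]'hcond.1 ≠ b[n]'hcond.2 from heq),
            if_neg (show ¬ ((a0[i]'hcond.1 == b[n]'hcond.2) = true) from by simp [heq])]
        have hmemIff : b[n]'hcond.2 ∈ c ↔ avail.getD (b[n]'hcond.2) 0 > 0 := by
          rw [hinv]
          constructor
          · intro h; exact_mod_cast List.count_pos_iff.mpr h
          · intro h; exact List.count_pos_iff.mp (by exact_mod_cast h)
        by_cases hmem : b[n]'hcond.2 ∈ c
        · rw [if_pos hmem, if_pos (hmemIff.mp hmem)]
          have hrm : (PySem.List.remove? c (b[n]'hcond.2)).getD c = c.erase (b[n]'hcond.2) := by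
            rw [PySem.List.remove?_eq_some_erase _ _ hmem]; rfl
          have hins : PySem.List.insert (b.take n ++ a0.drop i) (n : Int) (b[n]'hcond.2)
              = b.take (n+1) ++ a0.drop i := by
            rw [PySem.List.insert_natCast _ _ _ (by omega), take_succ_getElem b n hcond.2]
            have h1 : (b.take n ++ a0.drop i).take n = b.take n := by
              rw [List.take_append_of_le_length (by simp; omega), List.take_take]
              simp
            have h2 : (b.take n ++ a0.drop i).drop n = a0.drop i := by
              rw [List.drop_append_of_le_length (by simp; omega)]
              simp
            rw [h1, h2, List.append_assoc, List.singleton_append]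
          rw [hrm, hins]
          refine ih i (n+1) (c.erase (b[n]'hcond.2))
            (avail.insert (b[n]'hcond.2) (avail.getD (b[n]'hcond.2) 0 - 1))
            (by omega) (by omega) (by omega) ?_
          intro ch
          rw [PySem.Dict.getD_insert, List.count_erase]
          by_cases hch : ch = b[n]'hcond.2
          · have hpos : 0 < c.count (b[n]'hcond.2) := List.count_pos_iff.mpr hmem
            rw [if_pos hch, hch, hinv]
            simp only [BEq.rfl, if_true]
            omega
          · rw [if_neg hch, hinv ch]
            simp [Ne.symm hch]
        · rw [if_neg hmem, if_neg (show ¬ (avail.getD (b[n]'hcond.2) 0 > 0) from by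
            rw [← hmemIff]; exact hmem)]
    · have hc1 : ¬ (n < (b.take n ++ a0.drop i).length ∧ n < b.length) := by
        rw [hlen]; omega
      rw [dif_neg hc1, dif_neg hcond]
      have hiff : (b.take n ++ a0.drop i = b) ↔ (i = a0.length ∧ n = b.length) := by
        constructor
        · intro h
          rcases (not_and_or.mp hcond) with h1 | h1
          · have hi' : i = a0.length := by omega
            subst hi'
            rw [List.drop_length, List.append_nil] at h
            have := congrArg List.length h
            simp at this
            exact ⟨rfl, by omega⟩
          · have hn' : n = b.length := by omega
            subst hn'
            rw [List.take_length] at h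
            have := congrArg List.length h
            simp at this
            exact ⟨by omega, rfl⟩
        · rintro ⟨h1, h2⟩
          subst h1; subst h2
          simp
      have hEq : (b.take n ++ a0.drop i == b) = decide (i = a0.length ∧ n = b.length) := by
        rw [Bool.eq_iff_iff]
        simp [hiff]
      rw [hEq, Bool.decide_and]

-- ===== VERDICT (by name: the statement is the Claim_ definition above) =====
theorem convert_a_to_b_spec : Claim_equal_convert_a_to_b := by
  intro a b c _
  unfold Spec_convert_a_to_b convert_a_to_b convert_a_to_b_alt
  have hfold : (c.toList.foldl (fun d ch => d.modify ch 0 (· + 1)) PySem.Dict.empty)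
      = PySem.Dict.counter c.toList := (PySem.Dict.counter_eq_foldl c.toList).symm
  have := convAux_eq_alt a.toList b.toList
    (a.toList.length + b.toList.length) 0 0 c.toList
    (PySem.Dict.counter c.toList) (by omega) (by omega) (by omega)
    (fun ch => PySem.Dict.getD_counter c.toList ch)
  simpa [hfold] using this
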